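-- pv_equiv track=rewrite | github.com/CjangCjengh/convert_nom_r1 | r1_convert.py | check_nom_script
-- ===== SOURCE A (Python) =====
-- def check_nom_script(nom_text, nom_options):
--     nom_groups = [v for v in nom_options.values()]
--     group_ptr = 0
--     for c in nom_text:
--         if c in nom_groups[group_ptr]:
--             group_ptr += 1
--             if group_ptr == len(nom_groups):
--                 return True
--     return False
-- ===== SOURCE B (Python) =====
-- def check_nom_script(nom_text, nom_options):
--     # Match right-to-left: consume the text from the end, satisfying the
--     # groups in reverse order.  Backward greedy matching succeeds exactly
--     # when an ordered embedding of the groups into the text exists, i.e.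
--     # exactly when A's forward greedy scan succeeds.
--     rest = nom_text[::-1]
--     for g in reversed(list(nom_options.values())):
--         while rest and rest[0] not in g:
--             rest = rest[1:]
--         if not rest:
--             return False
--         rest = rest[1:]
--     return True
-- ===== Notes on version B (the rewrite author's own statement) =====
-- stated objective: alternative
-- what changed: B matches from the right: it reverses the text and satisfies the groups in reverse order by a backward greedy scan, instead of A's single forward pass carrying a group pointer; correct because either greedy direction succeeds exactly when an ordered embedding of the groups into the text exists.
-- outside the precondition, e.g. on check_nom_script('', {}): A returns False, B returns True; on check_nom_script('x', {}): A raises IndexError, B returns True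
import Mathlib
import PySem

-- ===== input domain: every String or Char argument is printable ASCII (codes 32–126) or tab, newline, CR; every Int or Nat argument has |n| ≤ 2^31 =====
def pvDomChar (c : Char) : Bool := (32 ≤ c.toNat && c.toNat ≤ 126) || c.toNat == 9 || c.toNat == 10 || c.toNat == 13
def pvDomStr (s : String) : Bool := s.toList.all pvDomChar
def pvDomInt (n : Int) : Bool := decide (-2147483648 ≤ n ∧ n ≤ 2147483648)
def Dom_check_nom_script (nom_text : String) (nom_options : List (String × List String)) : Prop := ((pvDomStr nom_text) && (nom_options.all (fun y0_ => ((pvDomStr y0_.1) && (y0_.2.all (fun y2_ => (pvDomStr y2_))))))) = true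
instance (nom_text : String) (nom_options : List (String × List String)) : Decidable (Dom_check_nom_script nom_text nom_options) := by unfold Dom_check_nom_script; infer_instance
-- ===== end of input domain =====

-- B matches the groups right-to-left over the reversed text (backward greedy) instead of
-- A's forward scan with a group pointer; alternative algorithm, same cost.

-- ===== PORT A =====
-- A's character loop: walks nom_text left to right carrying group_ptr;
-- `c in nom_groups[group_ptr]` (out-of-range index, possible only for empty
-- nom_options, is excluded by Pre_; getD stands in for the raising index)
def aLoop (groups : List (List String)) : List Char → Nat → Bool
  | [], _ => false
  | c :: cs, ptr =>
    if (groups.getD ptr []).contains (String.ofList [c]) then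
      if ptr + 1 = groups.length then true
      else aLoop groups cs (ptr + 1)
    else aLoop groups cs ptr

def check_nom_script (nom_text : String) (nom_options : List (String × List String)) : Bool :=
  let nom_groups := nom_options.map Prod.snd
  aLoop nom_groups nom_text.toList 0

-- ===== PORT B =====
-- `while rest and rest[0] not in g: rest = rest[1:]`
def bSkip (g : List String) : List Char → List Char
  | [] => []
  | c :: cs => if g.contains (String.ofList [c]) then c :: cs else bSkip g cs

-- the `for g in reversed(...)` loop over the shared `rest` stream
def bLoop : List Char → List (List String) → Bool
  | _, [] => true
  | rest, g :: gs =>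
    match bSkip g rest with
    | [] => false
    | _ :: rest' => bLoop rest' gs

def check_nom_script_alt (nom_text : String) (nom_options : List (String × List String)) : Bool :=
  bLoop nom_text.toList.reverse ((nom_options.map Prod.snd).reverse)

-- ===== PRECONDITION & SPEC =====
-- Pre_ excludes empty nom_options, on which A raises IndexError for non-empty nom_text
-- and returns False for empty nom_text only as an accident of its loop never running.
def Pre_check_nom_script (_nom_text : String) (nom_options : List (String × List String)) : Prop :=
  nom_options ≠ []
instance (nom_text : String) (nom_options : List (String × List String)) : Decidable (Pre_check_nom_script nom_text nom_options) := by unfold Pre_check_nom_script; infer_instance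
def pvWitness_check_nom_script : String × (List (String × List String)) := ("ab", [("g1", ["a"]), ("g2", ["b"])])

def Spec_check_nom_script (nom_text : String) (nom_options : List (String × List String)) (out : Bool) : Prop := out = check_nom_script_alt nom_text nom_options
instance (nom_text : String) (nom_options : List (String × List String)) (out : Bool) : Decidable (Spec_check_nom_script nom_text nom_options out) := by unfold Spec_check_nom_script; infer_instance

-- ===== CLAIM (what is proved, stated in full; the proofs are below) =====
def Claim_equal_check_nom_script : Prop := ∀ (nom_text : String) (nom_options : List (String × List String)), Dom_check_nom_script nom_text nom_options → Pre_check_nom_script nom_text nom_options → Spec_check_nom_script nom_text nom_options (check_nom_script nom_text nom_options)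

-- ===== LEMMAS AND PROOFS =====

-- Specification predicate: the groups embed, in order, into the text
-- (an ordered subsequence of characters, one per group).
def Emb : List (List String) → List Char → Prop
  | [], _ => True
  | _ :: _, [] => False
  | g :: gs, c :: cs =>
      (String.ofList [c] ∈ g ∧ Emb gs cs) ∨ Emb (g :: gs) cs

lemma emb_skip (gs : List (List String)) (c : Char) (cs : List Char)
    (h : Emb gs cs) : Emb gs (c :: cs) := by
  cases gs with
  | nil => trivial
  | cons g gs => exact Or.inr h

lemma emb_drop (g : List String) (gs : List (List String)) :
    ∀ (cs : List Char), Emb (g :: gs) cs → Emb gs cs := by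
  intro cs
  induction cs with
  | nil => intro h; exact h.elim
  | cons c cs ih =>
    intro h
    cases h with
    | inl h => exact emb_skip gs c cs h.2
    | inr h => exact emb_skip gs c cs (ih h)

-- A's forward greedy loop computes exactly the embedding predicate,
-- with the pointer at ptr standing for the still-unsatisfied group suffix.
lemma bLoop_iff_emb : ∀ (cs : List Char) (gs : List (List String)),
    bLoop cs gs = true ↔ Emb gs cs := by
  intro cs
  induction cs with
  | nil =>
    intro gs
    cases gs with
    | nil => simp [bLoop, Emb]
    | cons g gs => simp [bLoop, bSkip, Emb]
  | cons c cs ih =>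
    intro gs
    cases gs with
    | nil => simp [bLoop, Emb]
    | cons g gs =>
      by_cases hc : String.ofList [c] ∈ g
      · have : bLoop (c :: cs) (g :: gs) = bLoop cs gs := by
          simp [bLoop, bSkip, hc]
        rw [this, ih gs]
        constructor
        · intro h; exact Or.inl ⟨hc, h⟩
        · intro h
          cases h with
          | inl h => exact h.2
          | inr h => exact emb_drop g gs cs h
      · have : bLoop (c :: cs) (g :: gs) = bLoop cs (g :: gs) := by
          simp [bLoop, bSkip, hc]
        rw [this, ih (g :: gs)]
        constructor
        · intro h; exact Or.inr h
        · intro h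
          cases h with
          | inl h => exact absurd h.1 hc
          | inr h => exact h
      
lemma emb_nil_pattern (cs : List Char) : Emb [] cs := by
  cases cs <;> trivial

lemma emb_text_snoc (c : Char) : ∀ (ts : List Char) (gs : List (List String)),
    Emb gs ts → Emb gs (ts ++ [c]) := by
  intro ts
  induction ts with
  | nil =>
    intro gs h
    cases gs with
    | nil => exact emb_nil_pattern [c]
    | cons g gs => exact h.elim
  | cons t ts ih =>
    intro gs h
    cases gs with
    | nil => exact emb_nil_pattern _
    | cons g gs =>
      cases h with
      | inl h => exact Or.inl ⟨h.1, ih gs h.2⟩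
      | inr h => exact Or.inr (ih (g :: gs) h)

lemma emb_snoc (g : List String) (c : Char) (hc : String.ofList [c] ∈ g) :
    ∀ (ts : List Char) (gs : List (List String)),
    Emb gs ts → Emb (gs ++ [g]) (ts ++ [c]) := by
  intro ts
  induction ts with
  | nil =>
    intro gs h
    cases gs with
    | nil => exact Or.inl ⟨hc, trivial⟩
    | cons g0 gs0 => exact h.elim
  | cons t ts ih =>
    intro gs h
    cases gs with
    | nil =>
      -- need Emb [g] (t :: ts ++ [c]); skip t
      exact Or.inr (ih [] (emb_nil_pattern ts))
    | cons g0 gs0 =>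
      cases h with
      | inl h => exact Or.inl ⟨h.1, ih gs0 h.2⟩
      | inr h => exact Or.inr (ih (g0 :: gs0) h)

lemma emb_rev : ∀ (ts : List Char) (gs : List (List String)),
    Emb gs ts → Emb gs.reverse ts.reverse := by
  intro ts
  induction ts with
  | nil =>
    intro gs h
    cases gs with
    | nil => trivial
    | cons g gs => exact h.elim
  | cons t ts ih =>
    intro gs h
    cases gs with
    | nil => simpa using emb_nil_pattern (t :: ts).reverse
    | cons g gs =>
      cases h with
      | inl h =>
        simpa using emb_snoc g t h.1 ts.reverse gs.reverse (ih gs h.2)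
      | inr h =>
        simpa using emb_text_snoc t ts.reverse (g :: gs).reverse (ih (g :: gs) h)

lemma emb_rev_iff (ts : List Char) (gs : List (List String)) :
    Emb gs ts ↔ Emb gs.reverse ts.reverse := by
  constructor
  · exact emb_rev ts gs
  · intro h
    simpa using emb_rev ts.reverse gs.reverse h

-- A's loop at pointer ptr equals B's loop shape on the unsatisfied group suffix.
lemma aLoop_eq_bLoop (cs : List Char) : ∀ (groups : List (List String)) (ptr : Nat),
    ptr < groups.length → aLoop groups cs ptr = bLoop cs (groups.drop ptr) := by
  induction cs with
  | nil =>
    intro groups ptr h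
    have : ∃ g gs, groups.drop ptr = g :: gs := by
      cases hd : groups.drop ptr with
      | nil => exfalso; have := List.drop_eq_nil_iff.mp hd; omega
      | cons g gs => exact ⟨g, gs, rfl⟩
    obtain ⟨g, gs, hd⟩ := this
    simp [aLoop, hd, bLoop, bSkip]
  | cons c cs ih =>
    intro groups ptr h
    have hget : groups[ptr]? = some groups[ptr] := List.getElem?_eq_getElem h
    have hd : groups.drop ptr = groups[ptr] :: groups.drop (ptr + 1) :=
      List.drop_eq_getElem_cons h
    by_cases hc : String.ofList [c] ∈ groups[ptr]
    · by_cases hlast : ptr + 1 = groups.length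
      · have hd1 : groups.drop (ptr + 1) = [] := by
          rw [List.drop_eq_nil_iff]; omega
        rw [hd]
        simp [aLoop, bLoop, bSkip, List.getD, hget, hc, hlast]
      · have h1 : ptr + 1 < groups.length := by omega
        rw [hd]
        simp [aLoop, bLoop, bSkip, List.getD, hget, hc, hlast, ih groups (ptr + 1) h1]
    · rw [hd]
      have := ih groups ptr h
      rw [hd] at this
      simp [aLoop, bLoop, bSkip, List.getD, hget, hc, this]

-- ===== VERDICT (by name: the statement is the Claim_ definition above) =====
theorem check_nom_script_spec : Claim_equal_check_nom_script := by
  intro nom_text nom_options _ hpre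
  unfold Spec_check_nom_script check_nom_script check_nom_script_alt
  set gs := nom_options.map Prod.snd with hgs
  set cs := nom_text.toList with hcs
  have hlen : 0 < gs.length := by
    simp [hgs, List.length_map]
    exact List.length_pos_iff.mpr hpre
  have h1 : aLoop gs cs 0 = bLoop cs gs := by
    simpa using aLoop_eq_bLoop cs gs 0 hlen
  have h2 : bLoop cs gs = bLoop cs.reverse gs.reverse := by
    have hiff : bLoop cs gs = true ↔ bLoop cs.reverse gs.reverse = true := by
      rw [bLoop_iff_emb, bLoop_iff_emb]
      exact emb_rev_iff cs gs
    exact Bool.eq_iff_iff.mpr hiff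
  simp only [h1, h2]
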